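-- pv_equiv track=rewrite | github.com/coldhearti/advent-of-code | src/days/day_6.py | idx_after_unique_identifier
-- ===== SOURCE A (Python) =====
-- from typing import Any, List, Optional
--
-- def idx_after_unique_identifier(data: str, identifier_size: int) -> int:
--     check_buffer: List[str] = []
--     i: int = 0
--     for i, char in enumerate(data):
--         if len(check_buffer) == identifier_size:
--             check_buffer.pop(0)
--         check_buffer.append(char)
--         if len(set(check_buffer)) == identifier_size:
--             break
--     return i
-- ===== SOURCE B (Python) =====
-- def idx_after_unique_identifier(data: str, identifier_size: int) -> int:
--     # O(n) sliding window: d = length of the longest duplicate-free suffix so far,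
--     # maintained with a last-occurrence map instead of rebuilding a buffer/set per index.
--     last = {}
--     d = 0
--     for i, ch in enumerate(data):
--         if ch in last:
--             d = min(d + 1, i - last[ch])
--         else:
--             d = d + 1
--         last[ch] = i
--         if d == identifier_size:
--             return i
--     return len(data) - 1 if data else 0
-- ===== Notes on version B (the rewrite author's own statement) =====
-- stated objective: faster
-- what changed: Replaces the per-index buffer pop/append plus set() rebuild with a one-pass sliding window that keeps a last-occurrence map and the length of the current duplicate-free suffix.
import Mathlib
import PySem

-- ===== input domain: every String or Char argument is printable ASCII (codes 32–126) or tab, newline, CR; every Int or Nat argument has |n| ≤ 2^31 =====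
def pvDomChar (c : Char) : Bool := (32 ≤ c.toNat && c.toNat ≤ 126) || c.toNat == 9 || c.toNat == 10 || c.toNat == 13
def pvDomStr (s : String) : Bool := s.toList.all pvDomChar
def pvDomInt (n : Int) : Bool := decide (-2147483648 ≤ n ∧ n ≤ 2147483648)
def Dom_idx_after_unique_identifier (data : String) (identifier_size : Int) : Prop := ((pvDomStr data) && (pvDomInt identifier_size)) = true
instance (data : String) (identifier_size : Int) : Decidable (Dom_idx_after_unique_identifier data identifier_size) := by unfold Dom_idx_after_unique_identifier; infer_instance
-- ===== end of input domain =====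

-- B replaces A's per-index buffer pop/append + set() rebuild (O(n*k)) by a one-pass
-- sliding window keeping a last-occurrence map and the length of the current
-- duplicate-free suffix (O(n)); equal return value on Pre_ (identifier_size ≠ 0 or empty data).

-- ===== PORT A =====
-- loop of A: state = (remaining chars, current index i, check_buffer);
-- 'check_buffer.pop(0)' is ported as .tail — exact here because it only fires when
-- len(check_buffer) == identifier_size, which under Pre_ is nonzero, so the buffer is nonempty.
def pvGoA (k : Int) : List Char → Int → List Char → Int
  | [], i, _ => i
  | c :: rest, i, buf =>
    let buf1 := if (buf.length : Int) = k then buf.tail else buf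
    let buf2 := buf1 ++ [c]
    if ((PySem.Set.ofList buf2).length : Int) = k then i
    else
      match rest with
      | [] => i
      | _ :: _ => pvGoA k rest (i + 1) buf2

def idx_after_unique_identifier (data : String) (identifier_size : Int) : Int :=
  pvGoA identifier_size data.toList 0 []

-- ===== PORT B =====
-- 'd = min(d + 1, i - last[ch]) if ch in last else d + 1' (B's window-length update)
def pvStepD (d i : Int) (o : Option Int) : Int :=
  match o with
  | some j => min (d + 1) (i - j)
  | none => d + 1

-- loop of B: state = (remaining chars, index i, window length d, last-occurrence dict)
def pvGoB (k : Int) : List Char → Int → Int → PySem.Dict Char Int → Option Int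
  | [], _, _, _ => none
  | c :: rest, i, d, last =>
    let d' := pvStepD d i (last.get? c)
    if d' = k then some i
    else pvGoB k rest (i + 1) d' (last.insert c i)

def idx_after_unique_identifier_alt (data : String) (identifier_size : Int) : Int :=
  match pvGoB identifier_size data.toList 0 0 PySem.Dict.empty with
  | some i => i
  | none => if data.toList ≠ [] then (data.toList.length : Int) - 1 else 0

-- ===== PRECONDITION & SPEC =====
-- Pre_ excludes only identifier_size = 0 on nonempty data, where A raises IndexError
-- (pop(0) on an empty buffer); A returns normally everywhere else.
def Pre_idx_after_unique_identifier (data : String) (identifier_size : Int) : Prop :=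
  data = "" ∨ identifier_size ≠ 0
instance (data : String) (identifier_size : Int) : Decidable (Pre_idx_after_unique_identifier data identifier_size) := by unfold Pre_idx_after_unique_identifier; infer_instance

def pvWitness_idx_after_unique_identifier : String × Int := ("abc", 3)

def Spec_idx_after_unique_identifier (data : String) (identifier_size : Int) (out : Int) : Prop := out = idx_after_unique_identifier_alt data identifier_size
instance (data : String) (identifier_size : Int) (out : Int) : Decidable (Spec_idx_after_unique_identifier data identifier_size out) := by unfold Spec_idx_after_unique_identifier; infer_instance

-- ===== CLAIM (what is proved, stated in full; the proofs are below) =====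
def Claim_equal_idx_after_unique_identifier : Prop := ∀ (data : String) (identifier_size : Int), Dom_idx_after_unique_identifier data identifier_size → Pre_idx_after_unique_identifier data identifier_size → Spec_idx_after_unique_identifier data identifier_size (idx_after_unique_identifier data identifier_size)

-- ===== LEMMAS AND PROOFS =====

-- pvNdp r = length of the longest duplicate-free prefix of r (r is the REVERSED
-- processed prefix of the data, so this is the longest duplicate-free suffix so far).
def pvNdp : List Char → Nat
  | [] => 0
  | c :: cs => min (pvNdp cs) (List.idxOf c cs) + 1

-- the index of the last occurrence of a in the processed prefix, i.e. in r.reverse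
def pvLastIdx (r : List Char) (a : Char) : Option Int :=
  if a ∈ r then some ((r.length : Int) - 1 - (List.idxOf a r : Int)) else none

lemma pvNdp_le (l : List Char) : pvNdp l ≤ l.length := by
  induction l with
  | nil => simp [pvNdp]
  | cons c cs ih =>
    have := List.idxOf_le_length (a := c) (l := cs)
    simp only [pvNdp, List.length_cons]
    omega

lemma pvIdxLtOfMemTake (cs : List Char) (c : Char) (n : Nat) (h : c ∈ cs.take n) :
    List.idxOf c cs < n := by
  induction cs generalizing n with
  | nil => simp at h
  | cons x t ih =>
    cases n with
    | zero => simp at h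
    | succ n' =>
      rw [List.take_succ_cons] at h
      by_cases hx : x = c
      · subst hx; simp
      · have hc : c ∈ t.take n' := by
          rcases List.mem_cons.mp h with h1 | h1
          · exact absurd h1.symm hx
          · exact h1
        have := ih n' hc
        simp [List.idxOf_cons, show (x == c) = false from beq_eq_false_iff_ne.mpr hx]
        omega

lemma pvMemTake (cs : List Char) (c : Char) (n : Nat)
    (h1 : List.idxOf c cs < n) (h2 : c ∈ cs) : c ∈ cs.take n := by
  induction cs generalizing n with
  | nil => simp at h2
  | cons x t ih =>
    cases n with
    | zero => omega
    | succ n' =>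
      rw [List.take_succ_cons]
      by_cases hx : x = c
      · simp [hx]
      · have hxc : (x == c) = false := beq_eq_false_iff_ne.mpr hx
        have hmem : c ∈ t := by
          rcases List.mem_cons.mp h2 with h | h
          · exact absurd h.symm hx
          · exact h
        have hidx : List.idxOf c (x :: t) = List.idxOf c t + 1 := by
          simp [List.idxOf_cons, hxc]
        exact List.mem_cons_of_mem _ (ih n' (by omega) hmem)

lemma pvNdp_take_nodup (l : List Char) : (l.take (pvNdp l)).Nodup := by
  induction l with
  | nil => simp
  | cons c cs ih =>
    simp only [pvNdp, List.take_succ_cons]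
    refine List.nodup_cons.mpr ⟨?_, ?_⟩
    · intro hmem
      have := pvIdxLtOfMemTake cs c _ hmem
      omega
    · have hm : min (pvNdp cs) (List.idxOf c cs) ≤ pvNdp cs := min_le_left _ _
      have : cs.take (min (pvNdp cs) (List.idxOf c cs))
          = (cs.take (pvNdp cs)).take (min (pvNdp cs) (List.idxOf c cs)) := by
        rw [List.take_take, min_eq_left hm]
      rw [this]
      exact List.Nodup.sublist (List.take_sublist _ _) ih

lemma pvNdp_ge_iff (l : List Char) (K : Nat) :
    K ≤ pvNdp l ↔ K ≤ l.length ∧ (l.take K).Nodup := by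
  constructor
  · intro h
    refine ⟨le_trans h (pvNdp_le l), ?_⟩
    have : l.take K = (l.take (pvNdp l)).take K := by rw [List.take_take, min_eq_left h]
    rw [this]
    exact List.Nodup.sublist (List.take_sublist _ _) (pvNdp_take_nodup l)
  · induction l generalizing K with
    | nil =>
      intro h
      have := h.1
      simp only [List.length_nil] at this
      simpa [pvNdp] using this
    | cons c cs ih =>
      rintro ⟨h1, h2⟩
      cases K with
      | zero => exact Nat.zero_le _
      | succ K' =>
        rw [List.take_succ_cons] at h2
        obtain ⟨hnm, hnd⟩ := List.nodup_cons.mp h2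
        simp only [List.length_cons] at h1
        have hK' : K' ≤ pvNdp cs := ih K' ⟨by omega, hnd⟩
        have hidx : K' ≤ List.idxOf c cs := by
          by_contra hcon
          have hcon2 : List.idxOf c cs < K' := by omega
          have hclen : List.idxOf c cs < cs.length := by omega
          exact hnm (pvMemTake cs c K' hcon2 (List.idxOf_lt_length_iff.mp hclen))
        simp only [pvNdp]
        omega

lemma pvDiscardSub (s : PySem.Set Char) (x : Char) : (PySem.Set.discard s x).Sublist s := by
  unfold PySem.Set.discard
  exact List.filter_sublist

lemma pvOfListSub (xs : List Char) : (PySem.Set.ofList xs).Sublist xs := by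
  induction xs with
  | nil => exact List.nil_sublist _
  | cons x xs ih =>
    rw [PySem.Set.ofList_cons]
    exact ((pvDiscardSub _ x).trans ih).cons₂ x

lemma pvOfListLen (xs : List Char) :
    (PySem.Set.ofList xs).length = xs.length ↔ xs.Nodup := by
  constructor
  · intro h
    have heq := (pvOfListSub xs).eq_of_length h
    rw [← heq]
    exact PySem.Set.nodup_ofList xs
  · intro h
    rw [PySem.Set.ofList_eq_self_of_nodup _ h]

lemma pvTakeRevTail (l : List Char) (K : Nat) (h : K ≤ l.length) :
    (l.take K).reverse.tail = (l.take (K - 1)).reverse := by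
  rw [List.tail_reverse]
  congr 1
  rcases lt_or_eq_of_le h with hlt | heq
  · exact List.dropLast_take hlt
  · rw [heq, List.take_length, List.dropLast_eq_take]

lemma pvBufStep (l : List Char) (n : Nat) (c : Char) :
    (l.take n).reverse ++ [c] = ((c :: l).take (n + 1)).reverse := by
  rw [List.take_succ_cons, List.reverse_cons]

lemma pvDStep (r : List Char) (c : Char) :
    pvStepD ((pvNdp r : Int)) ((r.length : Int)) (pvLastIdx r c) = ((pvNdp (c :: r) : Int)) := by
  by_cases h : c ∈ r
  · have hL : pvLastIdx r c = some ((r.length : Int) - 1 - (List.idxOf c r : Int)) := by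
      unfold pvLastIdx; rw [if_pos h]
    rw [hL]
    have h1 : List.idxOf c r < r.length := List.idxOf_lt_length_iff.mpr h
    simp only [pvStepD, pvNdp]
    push_cast
    omega
  · have hL : pvLastIdx r c = none := by unfold pvLastIdx; rw [if_neg h]
    rw [hL]
    have h1 : List.idxOf c r = r.length := by
      have h2 := List.idxOf_le_length (a := c) (l := r)
      have h3 : ¬ List.idxOf c r < r.length := fun hh => h (List.idxOf_lt_length_iff.mp hh)
      omega
    have h4 := pvNdp_le r
    simp only [pvStepD, pvNdp]
    push_cast
    omega

lemma pvLastIdx_insert (last : PySem.Dict Char Int) (r : List Char) (c : Char)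
    (h : ∀ a, last.get? a = pvLastIdx r a) :
    ∀ b, (last.insert c ((r.length : Int))).get? b = pvLastIdx (c :: r) b := by
  intro b
  rw [PySem.Dict.get?_insert]
  by_cases hbc : b = c
  · subst hbc
    rw [if_pos rfl]
    unfold pvLastIdx
    rw [if_pos (List.mem_cons_self ..)]
    have hidx : List.idxOf b (b :: r) = 0 := by simp
    rw [hidx]
    simp only [List.length_cons, Option.some.injEq]
    push_cast
    omega
  · rw [if_neg hbc, h b]
    unfold pvLastIdx
    by_cases hbr : b ∈ r
    · rw [if_pos hbr, if_pos (List.mem_cons_of_mem _ hbr)]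
      have hidx : List.idxOf b (c :: r) = List.idxOf b r + 1 := by
        simp [List.idxOf_cons, show (c == b) = false from beq_eq_false_iff_ne.mpr (fun hh => hbc hh.symm)]
      rw [hidx]
      simp only [List.length_cons, Option.some.injEq]
      push_cast
      omega
    · rw [if_neg hbr, if_neg (by simp [hbc, hbr])]

lemma pvCondA (r : List Char) (c : Char) (K : Nat) (hlt : pvNdp r < K) :
    (((PySem.Set.ofList (((c :: r).take (min (c :: r).length K)).reverse)).length : Int) = (K : Int))
      ↔ pvNdp (c :: r) = K := by
  have hlen : (((c :: r).take (min (c :: r).length K)).reverse).length = min (c :: r).length K := by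
    simp only [List.length_reverse, List.length_take]
    omega
  have hub : (PySem.Set.ofList (((c :: r).take (min (c :: r).length K)).reverse)).length
      ≤ min (c :: r).length K := le_trans (PySem.Set.length_ofList_le _) (le_of_eq hlen)
  have hmleK : min (c :: r).length K ≤ K := min_le_right _ _
  have hcons_le : pvNdp (c :: r) ≤ K := by
    have := min_le_left (pvNdp r) (List.idxOf c r)
    simp only [pvNdp]
    omega
  constructor
  · intro h
    have hNat : (PySem.Set.ofList (((c :: r).take (min (c :: r).length K)).reverse)).length = K := by
      exact_mod_cast h
    have hm2 : min (c :: r).length K = K := by omega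
    have hfull : (PySem.Set.ofList (((c :: r).take (min (c :: r).length K)).reverse)).length
        = (((c :: r).take (min (c :: r).length K)).reverse).length := by rw [hNat, hlen, hm2]
    have hnd := (pvOfListLen _).mp hfull
    have hndtake : ((c :: r).take K).Nodup := by
      rw [← hm2]
      exact List.nodup_reverse.mp hnd
    have hKlen : K ≤ (c :: r).length := by omega
    have := (pvNdp_ge_iff (c :: r) K).mpr ⟨hKlen, hndtake⟩
    omega
  · intro h
    obtain ⟨h1, h2⟩ := (pvNdp_ge_iff (c :: r) K).mp (le_of_eq h.symm)
    have hm2 : min (c :: r).length K = K := min_eq_right h1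
    have hnd : (((c :: r).take (min (c :: r).length K)).reverse).Nodup :=
      List.nodup_reverse.mpr (by rw [hm2]; exact h2)
    rw [PySem.Set.ofList_eq_self_of_nodup _ hnd, hlen, hm2]

-- proof helper: the shape of B's 'return inside the loop or fallback after it'
def pvUnmatch (o : Option Int) (e : Int) : Int :=
  match o with
  | some j => j
  | none => e

lemma hcons_le_aux (r : List Char) (c : Char) : pvNdp (c :: r) ≤ pvNdp r + 1 := by
  have := min_le_left (pvNdp r) (List.idxOf c r)
  simp only [pvNdp]
  omega

-- the coupled one-step induction: A's buffer loop and B's window loop agree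
lemma pvMain (K : Nat) (hK : 0 < K) :
    ∀ (cs r buf : List Char) (d : Int) (last : PySem.Dict Char Int),
      cs ≠ [] →
      buf = (r.take (min r.length K)).reverse →
      (∀ a, last.get? a = pvLastIdx r a) →
      d = ((pvNdp r : Int)) →
      pvNdp r < K →
      pvGoA (K : Int) cs ((r.length : Int)) buf =
        pvUnmatch (pvGoB (K : Int) cs ((r.length : Int)) d last)
          (((r.length : Int)) + ((cs.length : Int)) - 1) := by
  intro cs
  induction cs with
  | nil => intro r buf d last h; exact absurd rfl h
  | cons c rest ih =>
    intro r buf d last _ hbuf hlast hd hlt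
    subst hbuf hd
    have hbuf2 : (if (((r.take (min r.length K)).reverse.length : Nat) : Int) = (K : Int)
          then (r.take (min r.length K)).reverse.tail
          else (r.take (min r.length K)).reverse) ++ [c]
        = ((c :: r).take (min (c :: r).length K)).reverse := by
      by_cases hrK : K ≤ r.length
      · have hmin : min r.length K = K := min_eq_right hrK
        rw [hmin]
        rw [if_pos (by simp only [List.length_reverse, List.length_take]; omega)]
        rw [pvTakeRevTail r K hrK, pvBufStep]
        rw [show K - 1 + 1 = K from by omega,
            show min (c :: r).length K = K from by simp only [List.length_cons]; omega]
      · have hrK2 : r.length < K := by omega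
        have hmin : min r.length K = r.length := min_eq_left (le_of_lt hrK2)
        rw [hmin, List.take_length]
        rw [if_neg (by simp only [List.length_reverse]; omega)]
        rw [show min (c :: r).length K = (c :: r).length from by simp only [List.length_cons]; omega,
            List.take_length, List.reverse_cons]
    have hstep : pvStepD ((pvNdp r : Int)) ((r.length : Int)) (pvLastIdx r c)
        = ((pvNdp (c :: r) : Int)) := pvDStep r c
    simp only [pvGoA, pvGoB, hlast c, hstep, hbuf2]
    by_cases hbr : pvNdp (c :: r) = K
    · rw [if_pos ((pvCondA r c K hlt).mpr hbr),
          if_pos (by exact_mod_cast congrArg (fun n : Nat => (n : Int)) hbr)]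
      simp only [pvUnmatch]
    · rw [if_neg (fun h => hbr ((pvCondA r c K hlt).mp h)),
          if_neg (by intro h; exact hbr (by exact_mod_cast h))]
      have hlt' : pvNdp (c :: r) < K := by
        have := hcons_le_aux r c
        omega
      cases rest with
      | nil =>
        simp only [pvGoB, pvUnmatch, List.length_cons, List.length_nil]
        push_cast
        omega
      | cons h t =>
        have hlast' := pvLastIdx_insert last r c hlast
        have ihr := ih (c :: r) (((c :: r).take (min (c :: r).length K)).reverse)
          ((pvNdp (c :: r) : Int)) (last.insert c ((r.length : Int)))
          (by simp) rfl hlast' rfl hlt'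
        simp only [List.length_cons] at ihr ⊢
        push_cast at ihr ⊢
        cases hres : pvGoB (K : Int) (h :: t) ((r.length : Int) + 1)
            ((pvNdp (c :: r) : Int)) (last.insert c ((r.length : Int))) with
        | some j =>
          rw [hres] at ihr
          simp only [pvUnmatch] at ihr ⊢
          exact ihr
        | none =>
          rw [hres] at ihr
          simp only [pvUnmatch] at ihr ⊢
          exact ihr.trans (by omega)

lemma pvGoA_nobreak (k : Int) (hk : k < 0) :
    ∀ (cs : List Char) (i : Int) (buf : List Char), cs ≠ [] →
      pvGoA k cs i buf = i + (cs.length : Int) - 1 := by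
  intro cs
  induction cs with
  | nil => intro i buf h; exact absurd rfl h
  | cons c rest ih =>
    intro i buf _
    simp only [pvGoA]
    rw [if_neg (by
      intro h
      have := Int.natCast_nonneg ((PySem.Set.ofList
        ((if (buf.length : Int) = k then buf.tail else buf) ++ [c])).length)
      omega)]
    cases rest with
    | nil => simp
    | cons h t =>
      rw [ih (i + 1) _ (by simp)]
      simp only [List.length_cons]
      push_cast
      ring

lemma pvGoB_none (k : Int) (hk : k < 0) :
    ∀ (cs : List Char) (i d : Int) (last : PySem.Dict Char Int),
      0 ≤ d → (∀ a j, last.get? a = some j → j < i) →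
      pvGoB k cs i d last = none := by
  intro cs
  induction cs with
  | nil => intro i d last _ _; rfl
  | cons c rest ih =>
    intro i d last hd hlast
    simp only [pvGoB]
    have hpos : 0 < pvStepD d i (last.get? c) := by
      cases hgc : last.get? c with
      | none => simp only [pvStepD]; omega
      | some j =>
        have := hlast c j hgc
        simp only [pvStepD]
        omega
    rw [if_neg (by omega)]
    refine ih (i + 1) _ _ (by omega) ?_
    intro a j hj
    rw [PySem.Dict.get?_insert] at hj
    by_cases hac : a = c
    · rw [if_pos hac] at hj
      cases hj
      omega
    · rw [if_neg hac] at hj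
      have := hlast a j hj
      omega

-- ===== VERDICT (by name: the statement is the Claim_ definition above) =====
theorem idx_after_unique_identifier_spec : Claim_equal_idx_after_unique_identifier := by
  unfold Claim_equal_idx_after_unique_identifier
  intro data k _ hpre
  unfold Spec_idx_after_unique_identifier
  unfold idx_after_unique_identifier idx_after_unique_identifier_alt
  by_cases hl : data.toList = []
  · rw [hl]
    simp [pvGoA, pvGoB]
  · have hk0 : k ≠ 0 := by
      rcases hpre with h | h
      · exact absurd (by rw [h]; rfl) hl
      · exact h
    rcases lt_trichotomy k 0 with hk | hk | hk
    · rw [pvGoA_nobreak k hk _ 0 [] hl]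
      rw [pvGoB_none k hk _ 0 0 _ le_rfl (by
        intro a j hj
        rw [PySem.Dict.get?_empty] at hj
        cases hj)]
      have hgoal : (0 : Int) + (data.toList.length : Int) - 1
          = if data.toList ≠ [] then (data.toList.length : Int) - 1 else 0 := by
        rw [if_pos hl]
        omega
      exact hgoal
    · exact absurd hk hk0
    · have hKk : ((k.toNat : Nat) : Int) = k := Int.toNat_of_nonneg (le_of_lt hk)
      have hKpos : 0 < k.toNat := by omega
      have h := pvMain k.toNat hKpos data.toList [] [] 0 PySem.Dict.empty hl
        (by simp) (fun a => by simp [pvLastIdx, PySem.Dict.get?_empty]) (by simp [pvNdp])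
        (by simp [pvNdp]; omega)
      simp only [List.length_nil, Nat.cast_zero] at h
      rw [← hKk]
      rw [h]
      cases hres : pvGoB ((k.toNat : Int)) data.toList 0 0 PySem.Dict.empty with
      | some j =>
        simp only [pvUnmatch]
      | none =>
        simp only [pvUnmatch]
        have hgoal : (0 : Int) + (data.toList.length : Int) - 1
            = if data.toList ≠ [] then (data.toList.length : Int) - 1 else 0 := by
          rw [if_pos hl]
          omega
        exact hgoal
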